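-- pv_equiv track=rewrite | github.com/liaulab/be-scan | be_scan/sgrna/_guides_.py | categorize_mutations
-- ===== SOURCE A (Python) =====
-- def categorize_mutations(mut_list):
--     types = []
--     for mut in mut_list:
--         if len(mut) == 0 and 'Silent' not in types:
--             types.append('Silent')
--         elif '.' in mut and 'Nonsense' not in types:
--             types.append('Nonsense')
--         elif 'Missense' not in types:
--             types.append('Missense')
--     return sorted(types)
-- ===== SOURCE B (Python) =====
-- def categorize_mutations(mut_list):
--     silent = any(len(m) == 0 for m in mut_list)
--     nonsense = any('.' in m for m in mut_list)
--     missense = any(len(m) > 0 and '.' not in m for m in mut_list)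
--     types = []
--     if missense:
--         types.append('Missense')
--     if nonsense:
--         types.append('Nonsense')
--     if silent:
--         types.append('Silent')
--     return types
-- ===== Notes on version B (the rewrite author's own statement) =====
-- stated objective: simpler
-- what changed: Replaces A's stateful elif-chain over a growing list plus a final sort by three direct any() predicates (empty / contains '.' / other) from which the sorted category list is emitted directly.
-- intended difference: On lists with no genuine missense mutation but at least two empty (or two '.'-containing) entries, A's elif fall-through on the duplicate spuriously adds 'Missense' to the result (witness ['', '']); B omits it and returns just the categories actually present, which is the intended value. — e.g. on categorize_mutations(["", ""]): A returns ["Missense", "Silent"], B returns ["Silent"]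
import Mathlib
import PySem

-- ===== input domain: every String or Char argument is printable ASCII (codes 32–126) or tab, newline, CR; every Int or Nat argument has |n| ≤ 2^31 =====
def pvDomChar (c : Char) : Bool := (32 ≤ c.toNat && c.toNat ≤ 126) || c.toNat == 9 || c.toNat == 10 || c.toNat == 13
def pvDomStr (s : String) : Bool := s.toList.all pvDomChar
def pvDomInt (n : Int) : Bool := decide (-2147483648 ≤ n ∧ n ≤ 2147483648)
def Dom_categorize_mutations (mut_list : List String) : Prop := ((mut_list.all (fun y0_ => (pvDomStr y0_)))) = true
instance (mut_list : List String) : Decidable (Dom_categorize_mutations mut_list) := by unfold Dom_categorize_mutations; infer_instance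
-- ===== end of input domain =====

-- B replaces A's stateful elif-chain plus final sort by three direct any-predicates; objective:
-- simpler. A's duplicate fall-through (a second empty or second '.'-mutation adds 'Missense')
-- is declared as an intended difference in D_ below.

-- ===== PORT A =====
def categorize_mutations (mut_list : List String) : List String :=
  let types := mut_list.foldl (fun types mu =>
    if PySem.Str.len mu == 0 && !(types.contains "Silent") then types ++ ["Silent"]
    else if PySem.Str.isIn "." mu && !(types.contains "Nonsense") then types ++ ["Nonsense"]
    else if !(types.contains "Missense") then types ++ ["Missense"]
    else types) []
  PySem.List.sorted types (fun x => x) false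

-- ===== PORT B =====
def categorize_mutations_alt (mut_list : List String) : List String :=
  let silent := mut_list.any (fun m => PySem.Str.len m == 0)
  let nonsense := mut_list.any (fun m => PySem.Str.isIn "." m)
  let missense := mut_list.any (fun m => !(PySem.Str.len m == 0) && !(PySem.Str.isIn "." m))
  (if missense then ["Missense"] else []) ++
  (if nonsense then ["Nonsense"] else []) ++
  (if silent then ["Silent"] else [])

-- ===== PRECONDITION & SPEC =====
-- On lists with no genuine missense mutation but at least two empty (or two '.'-containing)
-- entries, A's elif fall-through on the duplicate spuriously adds 'Missense'; B returns only
-- the categories actually present, which is the intended value.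
def D_categorize_mutations (mut_list : List String) : Prop :=
  (∀ m ∈ mut_list, m = "" ∨ '.' ∈ m.toList) ∧
  (2 ≤ mut_list.countP (fun m => m = "") ∨ 2 ≤ mut_list.countP (fun m => '.' ∈ m.toList))
instance (mut_list : List String) : Decidable (D_categorize_mutations mut_list) := by
  unfold D_categorize_mutations; infer_instance

def Spec_categorize_mutations (mut_list : List String) (out : List String) : Prop :=
  ¬ D_categorize_mutations mut_list → out = categorize_mutations_alt mut_list
instance (mut_list : List String) (out : List String) : Decidable (Spec_categorize_mutations mut_list out) := by
  unfold Spec_categorize_mutations; infer_instance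

def pvDiffWitness_categorize_mutations : List String := ["", ""]
def pvDiffWitnessOut_categorize_mutations : (List String) × (List String) :=
  (["Missense", "Silent"], ["Silent"])

-- ===== CLAIM =====
def Claim_unchanged_categorize_mutations : Prop :=
  ∀ (mut_list : List String), Dom_categorize_mutations mut_list →
    Spec_categorize_mutations mut_list (categorize_mutations mut_list)
def Claim_changed_categorize_mutations : Prop :=
  Dom_categorize_mutations (pvDiffWitness_categorize_mutations) ∧
  D_categorize_mutations (pvDiffWitness_categorize_mutations) ∧
  categorize_mutations (pvDiffWitness_categorize_mutations) = pvDiffWitnessOut_categorize_mutations.1 ∧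
  categorize_mutations_alt (pvDiffWitness_categorize_mutations) = pvDiffWitnessOut_categorize_mutations.2 ∧
  pvDiffWitnessOut_categorize_mutations.1 ≠ pvDiffWitnessOut_categorize_mutations.2
def Claim_exact_categorize_mutations : Prop :=
  ∀ (mut_list : List String), Dom_categorize_mutations mut_list →
    D_categorize_mutations mut_list →
    categorize_mutations mut_list ≠ categorize_mutations_alt mut_list

-- ===== LEMMAS AND PROOFS =====

-- counts of the three kinds of entries (proof-only)
def cntE (l : List String) : Nat := l.countP (fun m => PySem.Str.len m == 0)
def cntD (l : List String) : Nat := l.countP (fun m => PySem.Str.isIn "." m)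
def cntO (l : List String) : Nat := l.countP (fun m => !(PySem.Str.len m == 0) && !(PySem.Str.isIn "." m))

-- bridges between the ports' PySem predicates and D_'s plain predicates
theorem lenP (m : String) : (PySem.Str.len m == 0) = decide (m = "") := by
  by_cases h : m = ""
  · subst h; decide
  · simp [PySem.Str.len, h]

theorem dotP (m : String) : (PySem.Str.isIn "." m) = decide ('.' ∈ m.toList) := by
  rcases Bool.eq_false_or_eq_true (PySem.Str.isIn "." m) with hb | hb <;> rw [hb]
  · have hinf : (".".toList) <:+: m.toList := (PySem.Str.isIn_iff_infix "." m).mp hb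
    have : '.' ∈ m.toList := hinf.mem (by simp)
    simp [this]
  · have hiff := PySem.Str.isIn_iff_infix "." m
    rw [hb] at hiff
    have hm : ¬ '.' ∈ m.toList := by
      intro hmem
      obtain ⟨s, t, hst⟩ := List.append_of_mem hmem
      have : (".".toList) <:+: m.toList := ⟨s, t, by simp [hst]⟩
      exact absurd (hiff.mpr this) (by simp)
    simp [hm]

theorem cntE_eq (l : List String) : cntE l = l.countP (fun m => m = "") := by
  unfold cntE; congr 1; funext m; exact lenP m

theorem cntD_eq (l : List String) : cntD l = l.countP (fun m => '.' ∈ m.toList) := by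
  unfold cntD; congr 1; funext m; exact dotP m

theorem D_iff (l : List String) :
    D_categorize_mutations l ↔ (cntO l = 0 ∧ (2 ≤ cntE l ∨ 2 ≤ cntD l)) := by
  unfold D_categorize_mutations
  rw [cntE_eq, cntD_eq]
  have hfun : (fun m => !(PySem.Str.len m == 0) && !(PySem.Str.isIn "." m)) =
      (fun m : String => decide (¬ m = "" ∧ ¬ '.' ∈ m.toList)) := by
    funext m
    rw [Bool.and_eq_decide]
    simp only [lenP, dotP]
    by_cases h1 : m = "" <;> by_cases h2 : '.' ∈ m.toList <;> simp [h1, h2]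
  have h0 : cntO l = 0 ↔ ∀ m ∈ l, m = "" ∨ '.' ∈ m.toList := by
    unfold cntO
    rw [hfun, List.countP_eq_zero]
    constructor <;> intro h m hm <;> have := h m hm <;>
      simp only [decide_eq_true_eq] at this ⊢ <;> tauto
  rw [h0]

-- what A's fold produces, as a function of the running counts
def canon (e d o : Nat) : List String :=
  (if 1 ≤ o ∨ 2 ≤ e ∨ 2 ≤ d then ["Missense"] else []) ++
  (if 1 ≤ d then ["Nonsense"] else []) ++
  (if 1 ≤ e then ["Silent"] else [])

-- what B produces, as a function of the counts
def canonB (e d o : Nat) : List String :=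
  (if 1 ≤ o then ["Missense"] else []) ++
  (if 1 ≤ d then ["Nonsense"] else []) ++
  (if 1 ≤ e then ["Silent"] else [])

-- A's loop body
def stepA (types : List String) (mu : String) : List String :=
  if PySem.Str.len mu == 0 && !(types.contains "Silent") then types ++ ["Silent"]
  else if PySem.Str.isIn "." mu && !(types.contains "Nonsense") then types ++ ["Nonsense"]
  else if !(types.contains "Missense") then types ++ ["Missense"]
  else types

theorem mem_canon_silent (e d o : Nat) : "Silent" ∈ canon e d o ↔ 1 ≤ e := by
  unfold canon; split_ifs <;> simp_all

theorem mem_canon_nonsense (e d o : Nat) : "Nonsense" ∈ canon e d o ↔ 1 ≤ d := by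
  unfold canon; split_ifs <;> simp_all

theorem mem_canon_missense (e d o : Nat) : "Missense" ∈ canon e d o ↔ (1 ≤ o ∨ 2 ≤ e ∨ 2 ≤ d) := by
  unfold canon; split_ifs <;> simp_all

theorem canon_pairwise (e d o : Nat) : (canon e d o).Pairwise (· < ·) := by
  unfold canon; split_ifs <;> simp <;> decide

theorem no_dot_in_nil : PySem.Chars.isIn ['.'] ([] : List Char) = false := by decide

-- main invariant: A's accumulator stays a permutation of canon of the running counts
theorem foldA_perm : ∀ (l : List String) (e d o : Nat) (acc : List String),
    acc.Perm (canon e d o) →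
    (l.foldl stepA acc).Perm (canon (e + cntE l) (d + cntD l) (o + cntO l)) := by
  intro l
  induction l with
  | nil => intro e d o acc h; simpa [cntE, cntD, cntO] using h
  | cons mu rest ih =>
    intro e d o acc h
    have hS : "Silent" ∈ acc ↔ 1 ≤ e := by rw [h.mem_iff, mem_canon_silent]
    have hN : "Nonsense" ∈ acc ↔ 1 ≤ d := by rw [h.mem_iff, mem_canon_nonsense]
    have hM : "Missense" ∈ acc ↔ (1 ≤ o ∨ 2 ≤ e ∨ 2 ≤ d) := by rw [h.mem_iff, mem_canon_missense]
    simp only [List.foldl_cons]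
    by_cases hz : mu = ""
    · -- empty string: no '.' in it
      have hce : cntE (mu :: rest) = cntE rest + 1 := by simp [cntE, hz]
      have hcd : cntD (mu :: rest) = cntD rest := by simp [cntD, hz, no_dot_in_nil]
      have hco : cntO (mu :: rest) = cntO rest := by simp [cntO, hz]
      rw [hce, hcd, hco]
      by_cases hs : "Silent" ∈ acc
      · have he1 : 1 ≤ e := hS.mp hs
        by_cases hm : "Missense" ∈ acc
        · have hstep : stepA acc mu = acc := by simp [stepA, hz, hs, hm, no_dot_in_nil]
          rw [hstep]
          have hcanon : canon (e + 1) d o = canon e d o := by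
            have hcond : (1 ≤ o ∨ 2 ≤ e ∨ 2 ≤ d) := hM.mp hm
            unfold canon
            split_ifs <;> first | rfl | (exfalso; omega)
          have goal := ih (e + 1) d o acc (by rw [hcanon]; exact h)
          have harith : e + 1 + cntE rest = e + (cntE rest + 1) := by omega
          rw [harith] at goal
          exact goal
        · have hcond : ¬ (1 ≤ o ∨ 2 ≤ e ∨ 2 ≤ d) := fun hc => hm (hM.mpr hc)
          have hstep : stepA acc mu = acc ++ ["Missense"] := by
            simp [stepA, hz, hs, hm, no_dot_in_nil]
          rw [hstep]
          have hperm : (acc ++ ["Missense"]).Perm (canon (e + 1) d o) := by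
            have h2 : canon (e + 1) d o = "Missense" :: canon e d o := by
              unfold canon
              have c1 : (1 ≤ o ∨ 2 ≤ e + 1 ∨ 2 ≤ d) := by omega
              rw [if_pos c1, if_neg hcond]
              simp [he1, show 1 ≤ e + 1 by omega]
            rw [h2]
            exact (List.perm_append_singleton _ _).trans (List.Perm.cons _ h)
          have goal := ih (e + 1) d o _ hperm
          have harith : e + 1 + cntE rest = e + (cntE rest + 1) := by omega
          rw [harith] at goal
          exact goal
      · have he0 : e = 0 := by
          by_contra hne
          exact hs (hS.mpr (by omega))
        have hstep : stepA acc mu = acc ++ ["Silent"] := by simp [stepA, hz, hs]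
        rw [hstep]
        have hperm : (acc ++ ["Silent"]).Perm (canon (e + 1) d o) := by
          have h2 : canon (e + 1) d o = canon e d o ++ ["Silent"] := by
            subst he0
            unfold canon
            simp only [List.append_assoc]
            split_ifs <;> simp_all <;> omega
          rw [h2]
          exact h.append_right _
        have goal := ih (e + 1) d o _ hperm
        have harith : e + 1 + cntE rest = e + (cntE rest + 1) := by omega
        rw [harith] at goal
        exact goal
    · by_cases hd : PySem.Chars.isIn ['.'] mu.toList = true
      · -- contains '.'
        have hce : cntE (mu :: rest) = cntE rest := by simp [cntE, hz]
        have hcd : cntD (mu :: rest) = cntD rest + 1 := by simp [cntD, hd]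
        have hco : cntO (mu :: rest) = cntO rest := by simp [cntO, hd]
        rw [hce, hcd, hco]
        by_cases hn : "Nonsense" ∈ acc
        · have hd1 : 1 ≤ d := hN.mp hn
          by_cases hm : "Missense" ∈ acc
          · have hstep : stepA acc mu = acc := by simp [stepA, hz, hd, hn, hm]
            rw [hstep]
            have hcanon : canon e (d + 1) o = canon e d o := by
              have hcond : (1 ≤ o ∨ 2 ≤ e ∨ 2 ≤ d) := hM.mp hm
              unfold canon
              split_ifs <;> first | rfl | (exfalso; omega)
            have goal := ih e (d + 1) o acc (by rw [hcanon]; exact h)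
            have harith : d + 1 + cntD rest = d + (cntD rest + 1) := by omega
            rw [harith] at goal
            exact goal
          · have hcond : ¬ (1 ≤ o ∨ 2 ≤ e ∨ 2 ≤ d) := fun hc => hm (hM.mpr hc)
            have hstep : stepA acc mu = acc ++ ["Missense"] := by
              simp [stepA, hz, hd, hn, hm]
            rw [hstep]
            have hperm : (acc ++ ["Missense"]).Perm (canon e (d + 1) o) := by
              have h2 : canon e (d + 1) o = "Missense" :: canon e d o := by
                unfold canon
                have c1 : (1 ≤ o ∨ 2 ≤ e ∨ 2 ≤ d + 1) := by omega
                rw [if_pos c1, if_neg hcond]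
                simp [hd1, show 1 ≤ d + 1 by omega]
              rw [h2]
              exact (List.perm_append_singleton _ _).trans (List.Perm.cons _ h)
            have goal := ih e (d + 1) o _ hperm
            have harith : d + 1 + cntD rest = d + (cntD rest + 1) := by omega
            rw [harith] at goal
            exact goal
        · have hd0 : d = 0 := by
            by_contra hne
            exact hn (hN.mpr (by omega))
          have hstep : stepA acc mu = acc ++ ["Nonsense"] := by simp [stepA, hz, hd, hn]
          rw [hstep]
          have hperm : (acc ++ ["Nonsense"]).Perm (canon e (d + 1) o) := by
            subst hd0
            have h2 : canon e 1 o = (if 1 ≤ o ∨ 2 ≤ e then ["Missense"] else []) ++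
                ("Nonsense" :: (if 1 ≤ e then ["Silent"] else [])) := by
              unfold canon; norm_num
            have h3 : canon e 0 o = (if 1 ≤ o ∨ 2 ≤ e then ["Missense"] else []) ++
                (if 1 ≤ e then ["Silent"] else []) := by
              unfold canon; norm_num
            show (acc ++ ["Nonsense"]).Perm (canon e 1 o)
            refine (h.append_right ["Nonsense"]).trans ?_
            rw [h2, h3]
            simp only [List.append_assoc]
            exact List.Perm.append_left _ (List.perm_append_singleton _ _)
          have goal := ih e (d + 1) o _ hperm
          have harith : d + 1 + cntD rest = d + (cntD rest + 1) := by omega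
          rw [harith] at goal
          exact goal
      · -- other: nonempty without '.'
        have hce : cntE (mu :: rest) = cntE rest := by simp [cntE, hz]
        have hcd : cntD (mu :: rest) = cntD rest := by simp [cntD, hd]
        have hco : cntO (mu :: rest) = cntO rest + 1 := by simp [cntO, hz, hd]
        rw [hce, hcd, hco]
        by_cases hm : "Missense" ∈ acc
        · have hstep : stepA acc mu = acc := by simp [stepA, hz, hd, hm]
          rw [hstep]
          have hcanon : canon e d (o + 1) = canon e d o := by
            have hcond : (1 ≤ o ∨ 2 ≤ e ∨ 2 ≤ d) := hM.mp hm
            unfold canon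
            split_ifs <;> first | rfl | (exfalso; omega)
          have goal := ih e d (o + 1) acc (by rw [hcanon]; exact h)
          have harith : o + 1 + cntO rest = o + (cntO rest + 1) := by omega
          rw [harith] at goal
          exact goal
        · have hcond : ¬ (1 ≤ o ∨ 2 ≤ e ∨ 2 ≤ d) := fun hc => hm (hM.mpr hc)
          have hstep : stepA acc mu = acc ++ ["Missense"] := by simp [stepA, hz, hd, hm]
          rw [hstep]
          have hperm : (acc ++ ["Missense"]).Perm (canon e d (o + 1)) := by
            have h2 : canon e d (o + 1) = "Missense" :: canon e d o := by
              unfold canon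
              have c1 : (1 ≤ o + 1 ∨ 2 ≤ e ∨ 2 ≤ d) := by omega
              rw [if_pos c1, if_neg hcond]
              simp
            rw [h2]
            exact (List.perm_append_singleton _ _).trans (List.Perm.cons _ h)
          have goal := ih e d (o + 1) _ hperm
          have harith : o + 1 + cntO rest = o + (cntO rest + 1) := by omega
          rw [harith] at goal
          exact goal

-- A's exact value: the sorted canonical list of the counts
theorem A_eq_canon (l : List String) :
    categorize_mutations l = canon (cntE l) (cntD l) (cntO l) := by
  show PySem.List.sorted (l.foldl stepA []) (fun x => x) false = _
  have hperm : (l.foldl stepA []).Perm (canon (cntE l) (cntD l) (cntO l)) := by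
    have hbase := foldA_perm l 0 0 0 [] (by simp [canon])
    simpa using hbase
  have hpair : (canon (cntE l) (cntD l) (cntO l)).Pairwise
      (fun a b => (fun x : String => x) a < (fun x : String => x) b) :=
    canon_pairwise _ _ _
  exact PySem.List.sorted_eq_of_perm_of_pairwise_lt _ _ _ hperm.symm hpair

-- a Boolean 'any' equals positivity of the matching count
theorem any_eq_countP {α : Type} (p : α → Bool) (l : List α) :
    l.any p = decide (1 ≤ l.countP p) := by
  induction l with
  | nil => rfl
  | cons a t ih =>
    by_cases h : p a = true <;> simp [List.any_cons, h, ih]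

-- B's exact value: canonB of the counts
theorem alt_eq_canonB (l : List String) :
    categorize_mutations_alt l = canonB (cntE l) (cntD l) (cntO l) := by
  show (if l.any (fun m => !(PySem.Str.len m == 0) && !(PySem.Str.isIn "." m)) then ["Missense"] else []) ++
       (if l.any (fun m => PySem.Str.isIn "." m) then ["Nonsense"] else []) ++
       (if l.any (fun m => PySem.Str.len m == 0) then ["Silent"] else []) = _
  rw [any_eq_countP, any_eq_countP, any_eq_countP]
  unfold canonB cntE cntD cntO
  by_cases h1 : 1 ≤ l.countP (fun m => !(PySem.Str.len m == 0) && !(PySem.Str.isIn "." m)) <;>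
  by_cases h2 : 1 ≤ l.countP (fun m => PySem.Str.isIn "." m) <;>
  by_cases h3 : 1 ≤ l.countP (fun m => PySem.Str.len m == 0) <;>
  simp [h1, h2, h3]

-- ===== VERDICT =====
theorem categorize_mutations_spec : Claim_unchanged_categorize_mutations := by
  intro l _ hD
  rw [A_eq_canon, alt_eq_canonB]
  rw [D_iff] at hD
  unfold canon canonB
  have : (1 ≤ cntO l ∨ 2 ≤ cntE l ∨ 2 ≤ cntD l) ↔ 1 ≤ cntO l := by
    constructor
    · rintro (h | h | h)
      · exact h
      all_goals (by_contra hc; exact hD ⟨by omega, by omega⟩)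
    · exact Or.inl
  rw [if_congr this rfl rfl]

theorem categorize_mutations_changed : Claim_changed_categorize_mutations := by
  unfold Claim_changed_categorize_mutations
  refine ⟨by decide, by decide, ?_, ?_, by decide⟩
  · rw [A_eq_canon]; decide
  · rw [alt_eq_canonB]; decide

theorem categorize_mutations_tight : Claim_exact_categorize_mutations := by
  intro l _ hD
  rw [A_eq_canon, alt_eq_canonB]
  rw [D_iff] at hD
  obtain ⟨ho, hed⟩ := hD
  unfold canon canonB
  rw [ho]
  have h1 : (1 ≤ 0 ∨ 2 ≤ cntE l ∨ 2 ≤ cntD l) := by omega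
  rw [if_pos h1, if_neg (by omega : ¬ 1 ≤ 0)]
  intro hc
  have := congrArg List.length hc
  simp at this
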